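-- pv_equiv track=rewrite | github.com/chunw/oneDir | server.py | addFile
-- ===== SOURCE A (Python) =====
-- def addFile(dbstring, fname):
--     if dbstring is None:
--         dbstring = ""
--     fList = dbstring.split(';')
--     if fname in fList: # if the filename already exists, do nothing
--         return dbstring
--     else:
--         fList.append(fname)
--         newList = []
--         for i in fList:
--             x = i + ';'
--             newList.append(x)
--         newString = ''.join(newList)
--         return newString
-- ===== SOURCE B (Python) =====
-- def addFile(dbstring, fname):
--     if dbstring is None:
--         dbstring = ""
--     if fname in dbstring.split(';'):
--         return dbstring
--     return dbstring + ';' + fname + ';'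
-- ===== Notes on version B (the rewrite author's own statement) =====
-- stated objective: simpler
-- what changed: The per-element loop that rebuilds every split piece with a trailing ';' and joins them is replaced by the direct closed form dbstring + ';' + fname + ';', eliminating the list rebuild entirely.
import Mathlib
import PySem

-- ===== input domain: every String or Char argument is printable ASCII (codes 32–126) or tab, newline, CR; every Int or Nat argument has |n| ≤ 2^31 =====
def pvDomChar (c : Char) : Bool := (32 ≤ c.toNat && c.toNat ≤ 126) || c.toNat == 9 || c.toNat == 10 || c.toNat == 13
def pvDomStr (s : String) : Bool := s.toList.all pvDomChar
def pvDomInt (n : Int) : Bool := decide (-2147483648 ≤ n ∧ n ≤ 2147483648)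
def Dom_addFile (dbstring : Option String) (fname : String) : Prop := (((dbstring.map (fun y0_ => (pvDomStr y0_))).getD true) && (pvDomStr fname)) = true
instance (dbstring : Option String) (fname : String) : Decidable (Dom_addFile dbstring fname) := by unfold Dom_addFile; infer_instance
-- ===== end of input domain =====

-- B replaces A's append-to-each-piece-then-join loop by the closed form dbstring + ';' + fname + ';' (simpler; same membership guard).

-- ===== PORT A =====
def addFile (dbstring : Option String) (fname : String) : String :=
  let db := dbstring.getD ""
  let fList := PySem.Chars.splitOn db.toList [';']
  if fname.toList ∈ fList then db
  else
    let fList2 := fList ++ [fname.toList]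
    let newList := fList2.foldl (fun acc i => acc ++ [i ++ [';']]) []
    String.ofList (PySem.Chars.join [] newList)

-- ===== PORT B =====
def addFile_alt (dbstring : Option String) (fname : String) : String :=
  let db := dbstring.getD ""
  if fname.toList ∈ PySem.Chars.splitOn db.toList [';'] then db
  else String.ofList (db.toList ++ [';'] ++ fname.toList ++ [';'])

-- ===== PRECONDITION & SPEC =====
def Spec_addFile (dbstring : Option String) (fname : String) (out : String) : Prop := out = addFile_alt dbstring fname
instance (dbstring : Option String) (fname : String) (out : String) : Decidable (Spec_addFile dbstring fname out) := by unfold Spec_addFile; infer_instance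

-- ===== CLAIM (what is proved, stated in full; the proofs are below) =====
def Claim_equal_addFile : Prop := ∀ (dbstring : Option String) (fname : String), Dom_addFile dbstring fname → Spec_addFile dbstring fname (addFile dbstring fname)

-- ===== LEMMAS AND PROOFS =====

-- joining the split pieces of cs with a trailing ';' each reconstitutes cs ++ [';'] (invariant of splitOn.go)
theorem pvGoJoin (fuel : Nat) (l cur : List Char) (acc : List (List Char))
    (h : l.length < fuel) :
    ((PySem.Chars.splitOn.go [';'] fuel l cur acc).map (· ++ [';'])).flatten
      = (acc.reverse.map (· ++ [';'])).flatten ++ cur.reverse ++ l ++ [';'] := by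
  induction fuel generalizing l cur acc with
  | zero => omega
  | succ n ih =>
    cases l with
    | nil => simp [PySem.Chars.splitOn.go]
    | cons c rest =>
      rw [PySem.Chars.splitOn.go]
      by_cases hp : [';'].isPrefixOf (c :: rest) = true
      · have hc : c = ';' := by
          simp [List.isPrefixOf] at hp; exact hp.symm
        rw [if_pos hp]
        have hd : List.drop [';'].length (c :: rest) = rest := rfl
        rw [hd, ih _ _ _ (by simp at h ⊢; omega)]
        subst hc; simp
      · rw [if_neg hp]
        rw [ih _ _ _ (by simp at h ⊢; omega)]
        simp

theorem pvSplitJoin (cs : List Char) :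
    ((PySem.Chars.splitOn cs [';']).map (· ++ [';'])).flatten = cs ++ [';'] := by
  unfold PySem.Chars.splitOn
  rw [pvGoJoin _ _ _ _ (Nat.lt_succ_self _)]
  simp

theorem pvJoinNilFlatten (ps : List (List Char)) : PySem.Chars.join [] ps = ps.flatten := by
  simp only [PySem.Chars.join, List.intercalate]
  induction ps with
  | nil => simp
  | cons a t ih => cases t <;> simp_all [List.intersperse]

-- ===== VERDICT (by name: the statement is the Claim_ definition above) =====
theorem addFile_spec : Claim_equal_addFile := by
  intro dbstring fname _
  unfold Spec_addFile addFile addFile_alt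
  set db := dbstring.getD ""
  by_cases hm : fname.toList ∈ PySem.Chars.splitOn db.toList [';']
  · simp [hm]
  · simp only [hm, if_false]
    rw [PySem.List.foldl_append_singleton_eq_map, pvJoinNilFlatten]
    congr 1
    rw [List.map_append]
    simp only [List.nil_append, List.flatten_append]
    rw [pvSplitJoin]
    simp
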